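-- pv_equiv track=rewrite | github.com/martina-occhetta/MORGaN | morgan/analysis/bio.py | _match_go_to_classes
-- ===== SOURCE A (Python) =====
-- from typing import Dict, Iterable, List, Optional, Set, Tuple
--
-- GO_CLASS_MAP: Dict[str, List[str]] = {
--     "gpcr": ["GO:0004930", "G protein-coupled receptor activity"],
--     "kinase": ["GO:0004672", "protein kinase activity", "GO:0016301", "kinase activity"],
--     "ion_channel": [
--         "GO:0005216",
--         "ion channel activity",
--         "GO:0022836",
--         "gated channel activity",
--         "GO:0005244",
--         "voltage-gated",
--     ],
--     "transcription_factor": ["GO:0003700", "DNA-binding transcription factor activity"],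
--     "nuclear_receptor": ["GO:0004879", "nuclear receptor activity"],
--     "cytokine": ["GO:0005125", "cytokine activity"],
--     "cytokine_receptor": ["GO:0004896", "cytokine receptor activity"],
--     "transporter": ["GO:0005215", "transporter activity"],
--     "enzyme": ["GO:0003824", "catalytic activity"],
--     "receptor_tyr_kinase": ["GO:0004714", "transmembrane receptor protein tyrosine kinase activity"],
-- }
--
-- def _match_go_to_classes(go_terms: List[Dict[str, str]]) -> Set[str]:
--     classes: Set[str] = set()
--     terms = []
--     for t in go_terms or []:
--         if isinstance(t, dict):
--             terms.append(str(t.get("id", "")).lower())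
--             terms.append(str(t.get("term", "")).lower())
--         else:
--             terms.append(str(t).lower())
--     for cls, patterns in GO_CLASS_MAP.items():
--         for p in patterns:
--             p = p.lower()
--             if any(p in s for s in terms):
--                 classes.add(cls)
--                 break
--     return classes
-- ===== SOURCE B (Python) =====
-- from typing import Dict, List, Set
--
-- # Flat lookup table: (lowercased pattern, class), class-grouped in GO_CLASS_MAP order.
-- GO_PATTERNS: List = [
--     ("go:0004930", "gpcr"),
--     ("g protein-coupled receptor activity", "gpcr"),
--     ("go:0004672", "kinase"),
--     ("protein kinase activity", "kinase"),
--     ("go:0016301", "kinase"),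
--     ("kinase activity", "kinase"),
--     ("go:0005216", "ion_channel"),
--     ("ion channel activity", "ion_channel"),
--     ("go:0022836", "ion_channel"),
--     ("gated channel activity", "ion_channel"),
--     ("go:0005244", "ion_channel"),
--     ("voltage-gated", "ion_channel"),
--     ("go:0003700", "transcription_factor"),
--     ("dna-binding transcription factor activity", "transcription_factor"),
--     ("go:0004879", "nuclear_receptor"),
--     ("nuclear receptor activity", "nuclear_receptor"),
--     ("go:0005125", "cytokine"),
--     ("cytokine activity", "cytokine"),
--     ("go:0004896", "cytokine_receptor"),
--     ("cytokine receptor activity", "cytokine_receptor"),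
--     ("go:0005215", "transporter"),
--     ("transporter activity", "transporter"),
--     ("go:0003824", "enzyme"),
--     ("catalytic activity", "enzyme"),
--     ("go:0004714", "receptor_tyr_kinase"),
--     ("transmembrane receptor protein tyrosine kinase activity", "receptor_tyr_kinase"),
-- ]
--
-- def _match_go_to_classes(go_terms: List[Dict[str, str]]) -> Set[str]:
--     # One newline-joined blob of all lowercased terms: newline is safe, no pattern contains it.
--     blob = "\n".join(
--         str(x).lower()
--         for t in (go_terms or [])
--         for x in ((t.get("id", ""), t.get("term", "")) if isinstance(t, dict) else (t,))
--     )
--     return {cls for pat, cls in GO_PATTERNS if pat in blob}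
-- ===== Notes on version B (the rewrite author's own statement) =====
-- stated objective: alternative
-- what changed: A's class-keyed map with a per-pattern rescan of the term list is replaced by a flat pre-lowered (pattern, class) lookup table tested against one newline-joined blob of all terms (built by a flat comprehension instead of an append loop), collecting classes by a set comprehension over the table.
import Mathlib
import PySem

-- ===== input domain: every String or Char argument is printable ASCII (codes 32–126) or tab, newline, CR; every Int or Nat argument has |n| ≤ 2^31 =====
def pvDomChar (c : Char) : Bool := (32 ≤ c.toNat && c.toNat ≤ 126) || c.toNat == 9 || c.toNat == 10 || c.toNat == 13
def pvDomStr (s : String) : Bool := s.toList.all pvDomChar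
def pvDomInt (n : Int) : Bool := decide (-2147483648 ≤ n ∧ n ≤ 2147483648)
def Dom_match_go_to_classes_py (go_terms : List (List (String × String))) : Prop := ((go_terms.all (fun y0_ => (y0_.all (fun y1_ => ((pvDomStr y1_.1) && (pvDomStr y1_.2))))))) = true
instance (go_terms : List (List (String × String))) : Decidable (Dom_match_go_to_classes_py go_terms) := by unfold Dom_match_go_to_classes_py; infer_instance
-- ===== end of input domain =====

-- B replaces A's class-keyed map plus per-pattern rescan of the term list by a flat, pre-lowered
-- (pattern, class) table filtered against one newline-joined blob of all terms (alternative
-- representation; return value only, neither version mutates its argument).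

-- ===== PORT A =====
-- GO_CLASS_MAP, in insertion order (A's module constant)
def goClassMap : List (String × List String) :=
  [("gpcr", ["GO:0004930", "G protein-coupled receptor activity"]),
   ("kinase", ["GO:0004672", "protein kinase activity", "GO:0016301", "kinase activity"]),
   ("ion_channel", ["GO:0005216", "ion channel activity", "GO:0022836",
                    "gated channel activity", "GO:0005244", "voltage-gated"]),
   ("transcription_factor", ["GO:0003700", "DNA-binding transcription factor activity"]),
   ("nuclear_receptor", ["GO:0004879", "nuclear receptor activity"]),
   ("cytokine", ["GO:0005125", "cytokine activity"]),
   ("cytokine_receptor", ["GO:0004896", "cytokine receptor activity"]),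
   ("transporter", ["GO:0005215", "transporter activity"]),
   ("enzyme", ["GO:0003824", "catalytic activity"]),
   ("receptor_tyr_kinase", ["GO:0004714", "transmembrane receptor protein tyrosine kinase activity"])]

-- A's term-gathering loop (the input is a typed list of dicts, so the isinstance(t, dict)
-- branch is always taken, and str() on a str is the identity)
def gatherTerms (go_terms : List (List (String × String))) : List String :=
  go_terms.foldl (fun terms t =>
    terms ++ [PySem.Str.lower ((PySem.Dict.mk t).getD "id" ""),
              PySem.Str.lower ((PySem.Dict.mk t).getD "term" "")]) []

-- inner 'for p in patterns: if any(p in s for s in terms): classes.add(cls); break'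
def matchLoop (terms : List String) (classes : PySem.Set String) (cls : String) :
    List String → PySem.Set String
  | [] => classes
  | p :: rest =>
    if terms.any (fun s => PySem.Str.isIn (PySem.Str.lower p) s) then PySem.Set.add classes cls
    else matchLoop terms classes cls rest

def match_go_to_classes_py (go_terms : List (List (String × String))) : List String :=
  let terms := gatherTerms go_terms
  goClassMap.foldl (fun classes cp => matchLoop terms classes cp.1 cp.2) PySem.Set.empty

-- ===== PORT B =====
-- B's module constant: the flat lookup table of (lowercased pattern, class) pairs
def goPatterns : List (String × String) :=
  [("go:0004930", "gpcr"),
   ("g protein-coupled receptor activity", "gpcr"),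
   ("go:0004672", "kinase"),
   ("protein kinase activity", "kinase"),
   ("go:0016301", "kinase"),
   ("kinase activity", "kinase"),
   ("go:0005216", "ion_channel"),
   ("ion channel activity", "ion_channel"),
   ("go:0022836", "ion_channel"),
   ("gated channel activity", "ion_channel"),
   ("go:0005244", "ion_channel"),
   ("voltage-gated", "ion_channel"),
   ("go:0003700", "transcription_factor"),
   ("dna-binding transcription factor activity", "transcription_factor"),
   ("go:0004879", "nuclear_receptor"),
   ("nuclear receptor activity", "nuclear_receptor"),
   ("go:0005125", "cytokine"),
   ("cytokine activity", "cytokine"),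
   ("go:0004896", "cytokine_receptor"),
   ("cytokine receptor activity", "cytokine_receptor"),
   ("go:0005215", "transporter"),
   ("transporter activity", "transporter"),
   ("go:0003824", "enzyme"),
   ("catalytic activity", "enzyme"),
   ("go:0004714", "receptor_tyr_kinase"),
   ("transmembrane receptor protein tyrosine kinase activity", "receptor_tyr_kinase")]

def match_go_to_classes_py_alt (go_terms : List (List (String × String))) : List String :=
  let blob := PySem.Str.join "\n" (go_terms.flatMap (fun t =>
    [PySem.Str.lower ((PySem.Dict.mk t).getD "id" ""),
     PySem.Str.lower ((PySem.Dict.mk t).getD "term" "")]))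
  PySem.Set.ofList ((goPatterns.filter (fun pc => PySem.Str.isIn pc.1 blob)).map Prod.snd)

-- ===== PRECONDITION & SPEC =====
def Spec_match_go_to_classes_py (go_terms : List (List (String × String))) (out : List String) : Prop := out = match_go_to_classes_py_alt go_terms
instance (go_terms : List (List (String × String))) (out : List String) : Decidable (Spec_match_go_to_classes_py go_terms out) := by unfold Spec_match_go_to_classes_py; infer_instance

-- ===== CLAIM (what is proved, stated in full; the proofs are below) =====
def Claim_equal_match_go_to_classes_py : Prop := ∀ (go_terms : List (List (String × String))), Dom_match_go_to_classes_py go_terms → Spec_match_go_to_classes_py go_terms (match_go_to_classes_py go_terms)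

-- ===== LEMMAS AND PROOFS =====

-- p occurs in a ++ '\n' :: t iff it occurs in a or in t, provided p contains no '\n'
lemma infix_split (p a t : List Char) (hc : '\n' ∉ p) :
    p <:+: (a ++ '\n' :: t) ↔ p <:+: a ∨ p <:+: t := by
  constructor
  · rintro ⟨s, u, h⟩
    have hlen : s.length + p.length + u.length = a.length + 1 + t.length := by
      have := congrArg List.length h; simp at this; omega
    by_cases h1 : s.length + p.length ≤ a.length
    · left
      have h2 : s ++ p <+: a ++ '\n' :: t := ⟨u, by simpa [List.append_assoc] using h⟩
      have h3 : a <+: a ++ '\n' :: t := ⟨'\n' :: t, rfl⟩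
      have hsp : s ++ p <+: a :=
        List.prefix_of_prefix_length_le h2 h3 (by simpa using h1)
      have hpsp : p <:+: s ++ p := ⟨s, [], by simp⟩
      exact hpsp.trans hsp.isInfix
    · by_cases h2 : a.length + 1 ≤ s.length
      · right
        have hpu : p ++ u <:+ a ++ '\n' :: t := ⟨s, by simpa [List.append_assoc] using h⟩
        have ht : t <:+ a ++ '\n' :: t := ⟨a ++ ['\n'], by simp⟩
        have hsuf : p ++ u <:+ t :=
          List.suffix_of_suffix_length_le hpu ht (by simp only [List.length_append]; omega)
        have hp' : p <:+: p ++ u := ⟨[], u, by simp⟩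
        exact hp'.trans hsuf.isInfix
      · exfalso
        rw [Nat.not_le] at h1 h2
        have hhh : s ++ (p ++ u) = a ++ '\n' :: t := by
          rw [← List.append_assoc]; exact h
        have hi : a.length < (s ++ (p ++ u)).length := by
          simp only [List.length_append]; omega
        have hi2 : a.length < (a ++ '\n' :: t).length := by simp
        have e1 : (a ++ '\n' :: t)[a.length]'hi2 = '\n' := by
          rw [List.getElem_append_right (Nat.le_refl _)]; simp
        have e2 : (s ++ (p ++ u))[a.length]'hi = (a ++ '\n' :: t)[a.length]'hi2 := by
          simp_rw [hhh]
        have hR : (s ++ (p ++ u))[a.length]'hi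
            = p[a.length - s.length]'(by omega) := by
          rw [List.getElem_append_right (show s.length ≤ a.length by omega)]
          rw [List.getElem_append_left (show a.length - s.length < p.length by omega)]
        have hx : p[a.length - s.length]'(by omega) ∈ p := List.getElem_mem _
        rw [← hR, e2, e1] at hx
        exact hc hx
  · rintro (h | h)
    · exact h.trans (List.prefix_append a ('\n' :: t)).isInfix
    · have hsuf : t <:+ a ++ '\n' :: t := ⟨a ++ ['\n'], by simp⟩
      exact h.trans hsuf.isInfix

lemma infix_intercalate (p : List Char) (hp : p ≠ []) (hc : '\n' ∉ p) :
    ∀ (ls : List (List Char)),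
      (p <:+: List.intercalate ['\n'] ls ↔ ∃ s ∈ ls, p <:+: s)
  | [] => by simp [List.intercalate, hp]
  | [a] => by simp [List.intercalate]
  | a :: b :: rest => by
    have hstep : List.intercalate ['\n'] (a :: b :: rest)
        = a ++ '\n' :: List.intercalate ['\n'] (b :: rest) := by
      simp [List.intercalate]
    rw [hstep, infix_split p a _ hc, infix_intercalate p hp hc (b :: rest)]
    simp

-- 'any(p in s for s in terms)' equals 'p in "\n".join(terms)' for a newline-free nonempty p
lemma any_isIn_join (p : String) (hp : p.toList ≠ []) (hc : '\n' ∉ p.toList)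
    (terms : List String) :
    terms.any (fun s => PySem.Str.isIn p s)
      = PySem.Str.isIn p (PySem.Str.join "\n" terms) := by
  rw [Bool.eq_iff_iff, List.any_eq_true, PySem.Str.isIn_iff_infix]
  have hj : (PySem.Str.join "\n" terms).toList
      = List.intercalate ['\n'] (terms.map String.toList) := by
    simp [PySem.Str.toList_join, PySem.Chars.join]
  rw [hj, infix_intercalate p.toList hp hc]
  constructor
  · rintro ⟨s, hs, h⟩
    exact ⟨s.toList, List.mem_map_of_mem hs, (PySem.Str.isIn_iff_infix p s).mp h⟩
  · rintro ⟨l, hl, h⟩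
    obtain ⟨s, hs, rfl⟩ := List.mem_map.mp hl
    exact ⟨s, hs, (PySem.Str.isIn_iff_infix p s).mpr h⟩

-- the break loop adds the class exactly when some pattern matches
lemma matchLoop_eq (terms : List String) (classes : PySem.Set String) (cls : String)
    (patterns : List String) :
    matchLoop terms classes cls patterns
      = if patterns.any (fun p => terms.any (fun s => PySem.Str.isIn (PySem.Str.lower p) s))
        then PySem.Set.add classes cls else classes := by
  induction patterns with
  | nil => simp [matchLoop]
  | cons p rest ih =>
    cases hc : terms.any (fun s => PySem.Str.isIn (PySem.Str.lower p) s) with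
    | true => simp only [matchLoop, hc, List.any_cons, Bool.true_or, if_true]
    | false => simp only [matchLoop, hc, List.any_cons, Bool.false_or, if_false, ih,
                          Bool.false_eq_true]

-- adding an element already present is a no-op
lemma set_add_idem (s : PySem.Set String) (x : String) :
    PySem.Set.add (PySem.Set.add s x) x = PySem.Set.add s x := by
  by_cases h : x ∈ s
  · simp [PySem.Set.add, h]
  · simp [PySem.Set.add, h]

-- folding Set.add over k copies of cls (one per matching pattern) = one conditional add
lemma foldl_add_const {α : Type} (q : α → Bool) (cls : String) :
    ∀ (l : List α) (cl : PySem.Set String),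
      ((l.filter q).map (fun _ => cls)).foldl PySem.Set.add cl
        = if l.any q then PySem.Set.add cl cls else cl
  | [], cl => by simp
  | a :: t, cl => by
    cases hq : q a with
    | false =>
      simp only [List.filter_cons, hq, Bool.false_eq_true, if_false, List.any_cons, Bool.false_or]
      exact foldl_add_const q cls t cl
    | true =>
      simp only [List.filter_cons, hq, List.map_cons, List.foldl_cons,
        List.any_cons, Bool.true_or, if_true]
      rw [foldl_add_const q cls t (PySem.Set.add cl cls)]
      cases t.any q <;> simp only [if_true, if_false, Bool.false_eq_true, set_add_idem]

-- A's per-class conditional-add fold equals B's flat filter-map fold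
lemma fold_eq_flat (blob : String) :
    ∀ (cm : List (String × List String)) (cl : PySem.Set String),
      cm.foldl (fun cl cp =>
          if cp.2.any (fun p => PySem.Str.isIn (PySem.Str.lower p) blob)
          then PySem.Set.add cl cp.1 else cl) cl
        = (((cm.flatMap (fun cp => cp.2.map (fun p => (PySem.Str.lower p, cp.1)))).filter
              (fun pc => PySem.Str.isIn pc.1 blob)).map Prod.snd).foldl PySem.Set.add cl
  | [], cl => by simp
  | cp :: rest, cl => by
    simp only [List.foldl_cons, List.flatMap_cons, List.filter_append, List.map_append,
      List.foldl_append]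
    rw [fold_eq_flat blob rest]
    congr 1
    have hfm : (cp.2.map (fun p => (PySem.Str.lower p, cp.1))).filter
        (fun pc => PySem.Str.isIn pc.1 blob)
        = (cp.2.filter (fun p => PySem.Str.isIn (PySem.Str.lower p) blob)).map
            (fun p => (PySem.Str.lower p, cp.1)) := by
      rw [List.filter_map]; rfl
    have hcomp : (Prod.snd ∘ fun p => (PySem.Str.lower p, cp.1)) = fun _ => cp.1 := rfl
    rw [hfm, List.map_map, hcomp,
        foldl_add_const (fun p => PySem.Str.isIn (PySem.Str.lower p) blob) cp.1 cp.2 cl]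

lemma any_congr' {α : Type} (l : List α) {f g : α → Bool} (h : ∀ x ∈ l, f x = g x) :
    l.any f = l.any g := by
  induction l with
  | nil => rfl
  | cons a t ih =>
    simp only [List.any_cons, h a (List.mem_cons_self),
               ih (fun x hx => h x (List.mem_cons_of_mem _ hx))]

-- A's fold with the per-term scan = the same fold with the single-blob test
lemma fold_congr (terms : List String) (cm : List (String × List String))
    (h : ∀ cp ∈ cm, ∀ p ∈ cp.2,
        (PySem.Str.lower p).toList ≠ [] ∧ '\n' ∉ (PySem.Str.lower p).toList) :
    ∀ (classes : PySem.Set String),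
      cm.foldl (fun cl cp => matchLoop terms cl cp.1 cp.2) classes
        = cm.foldl (fun cl cp =>
            if cp.2.any (fun p => PySem.Str.isIn (PySem.Str.lower p) (PySem.Str.join "\n" terms))
            then PySem.Set.add cl cp.1 else cl) classes := by
  induction cm with
  | nil => intro classes; rfl
  | cons cp rest ih =>
    intro classes
    simp only [List.foldl_cons]
    have hcond : cp.2.any (fun p => terms.any (fun s => PySem.Str.isIn (PySem.Str.lower p) s))
        = cp.2.any (fun p => PySem.Str.isIn (PySem.Str.lower p) (PySem.Str.join "\n" terms)) := by
      apply any_congr'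
      intro p hpmem
      obtain ⟨h1, h2⟩ := h cp List.mem_cons_self p hpmem
      exact any_isIn_join (PySem.Str.lower p) h1 h2 terms
    rw [matchLoop_eq, hcond, ih (fun c hc => h c (List.mem_cons_of_mem _ hc))]

-- every lowered pattern of GO_CLASS_MAP is nonempty and newline-free (finite literal check)
set_option maxHeartbeats 2000000 in
lemma goClassMap_patterns_ok :
    ∀ cp ∈ goClassMap, ∀ p ∈ cp.2,
      (PySem.Str.lower p).toList ≠ [] ∧ '\n' ∉ (PySem.Str.lower p).toList := by
  decide

-- B's flat table is exactly A's map, flattened with lowered patterns (finite literal check)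
set_option maxHeartbeats 2000000 in
lemma goPatterns_eq_flat :
    goPatterns = goClassMap.flatMap (fun cp => cp.2.map (fun p => (PySem.Str.lower p, cp.1))) := by
  decide

-- ===== VERDICT (by name: the statement is the Claim_ definition above) =====
theorem match_go_to_classes_py_spec : Claim_equal_match_go_to_classes_py := by
  intro go_terms _
  unfold Spec_match_go_to_classes_py match_go_to_classes_py match_go_to_classes_py_alt
  have hterms : gatherTerms go_terms
      = go_terms.flatMap (fun t =>
          [PySem.Str.lower ((PySem.Dict.mk t).getD "id" ""),
           PySem.Str.lower ((PySem.Dict.mk t).getD "term" "")]) := by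
    unfold gatherTerms
    simpa using PySem.List.foldl_append_eq_flatMap
      (fun t => [PySem.Str.lower ((PySem.Dict.mk t).getD "id" ""),
                 PySem.Str.lower ((PySem.Dict.mk t).getD "term" "")]) go_terms ([])
  rw [fold_congr (gatherTerms go_terms) goClassMap goClassMap_patterns_ok,
      fold_eq_flat, PySem.Set.ofList_eq_foldl, goPatterns_eq_flat, hterms]
  rfl
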